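-- pv_equiv track=rewrite | github.com/Msangwool/Algorithm | 프로그래머스/0/181932. 코드 처리하기/코드 처리하기.py | solution
-- ===== SOURCE A (Python) =====
-- def solution(code):
--     mode = 0
--     answer = ''
--     for idx, c in enumerate(code):
--         if (c == '1'):
--             mode = changeMode(mode)
--             continue
--
--         if (mode == 0 and idx % 2 == 0 or mode == 1 and idx % 2 == 1):
--             answer += c
--     return answer if answer != '' else 'EMPTY'
--
-- def changeMode(mode):
--     return 1 if mode == 0 else 0
-- ===== SOURCE B (Python) =====
-- def solution(code):
--     # prefix pass: ones[i] = number of '1' characters in code[:i]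
--     prefix = []
--     ones = 0
--     for c in code:
--         prefix.append(ones)
--         ones += (c == '1')
--     # filter pass: mode at index i is prefix[i] % 2, keep c when mode == i % 2
--     ans = ''.join(c for (i, c), p in zip(enumerate(code), prefix)
--                   if c != '1' and (p + i) % 2 == 0)
--     return ans if ans != '' else 'EMPTY'
-- ===== Notes on version B (the rewrite author's own statement) =====
-- stated objective: alternative
-- what changed: Replaced the single stateful mode-toggling loop with a two-pass decomposition: a prefix pass records the number of preceding '1's at each index, then a stateless comprehension keeps code[i] when code[i] != '1' and (prefix[i] + i) is even.
import Mathlib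
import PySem

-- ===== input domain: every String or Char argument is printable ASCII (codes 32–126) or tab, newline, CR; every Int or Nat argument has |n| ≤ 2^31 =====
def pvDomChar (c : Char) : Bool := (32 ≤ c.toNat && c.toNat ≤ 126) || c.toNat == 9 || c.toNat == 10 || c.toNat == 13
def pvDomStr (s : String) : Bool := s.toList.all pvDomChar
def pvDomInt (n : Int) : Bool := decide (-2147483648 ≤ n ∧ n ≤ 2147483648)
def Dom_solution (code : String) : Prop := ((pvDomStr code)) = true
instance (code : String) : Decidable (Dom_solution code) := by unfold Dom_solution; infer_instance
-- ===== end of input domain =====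

-- B replaces A's stateful mode-toggling loop by a prefix-count pass plus a stateless filter pass (objective: alternative decomposition).

-- ===== PORT A =====
def changeMode (mode : Int) : Int := if mode = 0 then 1 else 0

/-- the body of A's `for` loop -/
def stepA (st : Int × String) (p : Int × Char) : Int × String :=
  if p.2 = '1' then (changeMode st.1, st.2)
  else if (st.1 = 0 ∧ p.1 % 2 = 0) ∨ (st.1 = 1 ∧ p.1 % 2 = 1) then (st.1, st.2.push p.2)
  else st

def solution (code : String) : String :=
  let st := (PySem.List.enumerate code.toList).foldl stepA (0, "")
  if st.2 ≠ "" then st.2 else "EMPTY"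

-- ===== PORT B =====
/-- the body of B's prefix-building loop -/
def stepB (st : List Int × Int) (c : Char) : List Int × Int :=
  (st.1 ++ [st.2], st.2 + (if c = '1' then 1 else 0))

/-- B's comprehension filter: keep `c` at index `i` when `c ≠ '1'` and `prefix[i] + i` is even -/
def filtB (q : (Int × Char) × Int) : Option Char :=
  if q.1.2 ≠ '1' ∧ (q.2 + q.1.1) % 2 = 0 then some q.1.2 else none

def solution_alt (code : String) : String :=
  let pr := code.toList.foldl stepB ([], 0)
  let ans := String.ofList (((PySem.List.enumerate code.toList).zip pr.1).filterMap filtB)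
  if ans ≠ "" then ans else "EMPTY"

-- ===== PRECONDITION & SPEC =====
def Spec_solution (code : String) (out : String) : Prop := out = solution_alt code
instance (code : String) (out : String) : Decidable (Spec_solution code out) := by unfold Spec_solution; infer_instance

-- ===== CLAIM (what is proved, stated in full; the proofs are below) =====
def Claim_equal_solution : Prop := ∀ (code : String), Dom_solution code → Spec_solution code (solution code)

-- ===== LEMMAS AND PROOFS =====

/-- Characterisation of A's loop: the characters it appends, starting at index `k` in mode `m`. -/
def runA (k m : Int) : List Char → List Char
  | [] => []
  | c :: cs =>
    if c = '1' then runA (k + 1) (changeMode m) cs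
    else if (m = 0 ∧ k % 2 = 0) ∨ (m = 1 ∧ k % 2 = 1) then c :: runA (k + 1) m cs
    else runA (k + 1) m cs

/-- Characterisation of B's filter pass, starting at index `k` with `o` preceding '1's. -/
def runB (k o : Int) : List Char → List Char
  | [] => []
  | c :: cs =>
    if c ≠ '1' ∧ (o + k) % 2 = 0
    then c :: runB (k + 1) (o + (if c = '1' then 1 else 0)) cs
    else runB (k + 1) (o + (if c = '1' then 1 else 0)) cs

/-- The prefix list B builds, starting from running count `o`. -/
def pfxL (o : Int) : List Char → List Int
  | [] => []
  | c :: cs => o :: pfxL (o + (if c = '1' then 1 else 0)) cs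

theorem foldA_run (cs : List Char) : ∀ (k m : Int) (s : String),
    ((PySem.List.enumerate cs k).foldl stepA (m, s)).2.toList = s.toList ++ runA k m cs := by
  induction cs with
  | nil => intro k m s; simp [PySem.List.enumerate_nil, runA]
  | cons c cs ih =>
    intro k m s
    rw [PySem.List.enumerate_cons, List.foldl_cons]
    by_cases h1 : c = '1'
    · rw [show stepA (m, s) (k, c) = (changeMode m, s) from by
        show (if c = '1' then _ else _) = _; rw [if_pos h1]]
      rw [ih]
      simp only [runA]
      rw [if_pos h1]
    · by_cases h2 : (m = 0 ∧ k % 2 = 0) ∨ (m = 1 ∧ k % 2 = 1)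
      · rw [show stepA (m, s) (k, c) = (m, s.push c) from by
          show (if c = '1' then _ else if _ then _ else _) = _; rw [if_neg h1, if_pos h2]]
        rw [ih]
        simp only [runA]
        rw [if_neg h1, if_pos h2]
        simp
      · rw [show stepA (m, s) (k, c) = (m, s) from by
          show (if c = '1' then _ else if _ then _ else _) = _; rw [if_neg h1, if_neg h2]]
        rw [ih]
        simp only [runA]
        rw [if_neg h1, if_neg h2]

theorem foldB_pfx (cs : List Char) : ∀ (acc : List Int) (o : Int),
    (cs.foldl stepB (acc, o)).1 = acc ++ pfxL o cs := by
  induction cs with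
  | nil => intro acc o; simp [pfxL]
  | cons c cs ih => intro acc o; rw [List.foldl_cons]; simp [stepB, pfxL, ih]

theorem zip_runB (cs : List Char) : ∀ (k o : Int),
    ((PySem.List.enumerate cs k).zip (pfxL o cs)).filterMap filtB = runB k o cs := by
  induction cs with
  | nil => intro k o; simp [PySem.List.enumerate_nil, pfxL, runB]
  | cons c cs ih =>
    intro k o
    rw [PySem.List.enumerate_cons]
    simp only [pfxL, List.zip_cons_cons, List.filterMap_cons]
    by_cases h : c ≠ '1' ∧ (o + k) % 2 = 0
    · rw [show filtB ((k, c), o) = some c from by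
        show (if _ then _ else _) = _; rw [if_pos h]]
      rw [ih]
      simp only [runB]
      rw [if_pos h]
    · rw [show filtB ((k, c), o) = none from by
        show (if _ then _ else _) = _; rw [if_neg h]]
      rw [ih]
      simp only [runB]
      rw [if_neg h]

theorem runA_eq_runB (cs : List Char) : ∀ (k o : Int), 0 ≤ o →
    runA k (o % 2) cs = runB k o cs := by
  induction cs with
  | nil => intro k o _; simp [runA, runB]
  | cons c cs ih =>
    intro k o ho
    by_cases h1 : c = '1'
    · simp only [runA, runB]
      rw [if_pos h1, if_neg (by simp [h1]), if_pos h1]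
      rw [show changeMode (o % 2) = (o + 1) % 2 from by unfold changeMode; split_ifs <;> omega]
      exact ih (k + 1) (o + 1) (by omega)
    · simp only [runA, runB]
      rw [if_neg h1, if_neg h1, add_zero]
      by_cases h2 : (o + k) % 2 = 0
      · rw [if_pos (show (o % 2 = 0 ∧ k % 2 = 0) ∨ (o % 2 = 1 ∧ k % 2 = 1) by omega),
            if_pos ⟨h1, h2⟩, ih (k + 1) o ho]
      · rw [if_neg (show ¬((o % 2 = 0 ∧ k % 2 = 0) ∨ (o % 2 = 1 ∧ k % 2 = 1)) by omega),
            if_neg (fun hh => h2 hh.2), ih (k + 1) o ho]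

-- ===== VERDICT (by name: the statement is the Claim_ definition above) =====
theorem solution_spec : Claim_equal_solution := by
  intro code _
  unfold Spec_solution solution solution_alt
  show (if ((PySem.List.enumerate code.toList).foldl stepA (0, "")).2 ≠ "" then
          ((PySem.List.enumerate code.toList).foldl stepA (0, "")).2 else "EMPTY")
      = (if String.ofList (((PySem.List.enumerate code.toList).zip
            ((code.toList.foldl stepB ([], 0)).1)).filterMap filtB) ≠ "" then
          String.ofList (((PySem.List.enumerate code.toList).zip
            ((code.toList.foldl stepB ([], 0)).1)).filterMap filtB) else "EMPTY")
  rw [show (code.toList.foldl stepB ([], 0)).1 = pfxL 0 code.toList from by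
        rw [foldB_pfx]; exact List.nil_append _]
  rw [zip_runB]
  have hr : runA 0 0 code.toList = runB 0 0 code.toList := by
    have h := runA_eq_runB code.toList 0 0 (by norm_num)
    simpa using h
  have hA := foldA_run code.toList 0 0 ""
  have hEq : ((PySem.List.enumerate code.toList).foldl stepA (0, "")).2
      = String.ofList (runB 0 0 code.toList) := by
    apply String.toList_inj.mp
    rw [hA, hr]
    simp
  rw [hEq]
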